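-- pv_equiv track=rewrite | github.com/cepalium/daily-coding-problems | python/290.py | quxes_tranformation
-- ===== SOURCE A (Python) =====
-- def quxes_tranformation(quxes):
--     """ return the smallest number of Quxes remaining after the transformation """
--     if len(quxes) == 0:    # trivial case
--         return 0
--     if len(quxes) == 1:
--         return 1
--     transformed = []    # queue of after-transformed Quxes
--     while quxes:
--         top_qux = quxes.pop(0)
--         while transformed and transformed[-1] != top_qux:    # loop: transform 2 different neighboring quxes
--             last_transformed = transformed.pop()
--             top_qux = new_qux(top_qux, last_transformed)
--         transformed.append(top_qux)
--     return len(transformed)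
--
-- def new_qux(a, b):
--     """ return the merged Qux from 2 input Quxes a & b """
--     quxes = ['R', 'G', 'B']
--     quxes.remove(a)
--     quxes.remove(b)
--     return quxes[0]
-- ===== SOURCE B (Python) =====
-- def quxes_tranformation(quxes):
--     """ return the smallest number of Quxes remaining after the transformation """
--     cur, cnt = None, 0
--     for q in quxes:
--         if cnt == 0:
--             cur, cnt = q, 1
--         elif q == cur:
--             cnt += 1
--         else:
--             t = new_qux(q, cur)
--             cur = q if cnt % 2 == 0 else t
--             cnt = 1
--     return cnt
--
-- def new_qux(a, b):
--     """ return the merged Qux from 2 input Quxes a & b """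
--     quxes = ['R', 'G', 'B']
--     quxes.remove(a)
--     quxes.remove(b)
--     return quxes[0]
-- ===== Notes on version B (the rewrite author's own statement) =====
-- stated objective: faster
-- what changed: Replaces A's explicit stack with inner pop-and-merge loop by a single run state (cur, cnt): since A's stack is always monochromatic, the inner while loop reduces to a parity test on cnt, giving one pass with O(1) state.
import Mathlib
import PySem

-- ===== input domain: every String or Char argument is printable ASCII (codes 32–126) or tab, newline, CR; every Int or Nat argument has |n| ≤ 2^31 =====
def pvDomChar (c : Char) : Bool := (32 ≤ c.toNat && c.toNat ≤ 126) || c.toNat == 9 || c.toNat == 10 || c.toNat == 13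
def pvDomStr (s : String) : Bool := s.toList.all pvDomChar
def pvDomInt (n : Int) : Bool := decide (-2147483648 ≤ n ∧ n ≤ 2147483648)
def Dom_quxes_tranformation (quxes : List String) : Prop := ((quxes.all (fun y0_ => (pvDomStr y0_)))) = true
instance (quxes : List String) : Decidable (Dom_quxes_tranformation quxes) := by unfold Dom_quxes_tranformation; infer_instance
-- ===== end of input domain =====

-- B replaces A's explicit stack + inner pop-and-merge loop by one pass with a single run state
-- (current color, count) and a parity test; equivalence is about the RETURN value only (A empties
-- its argument list in place for inputs of length ≥ 2, B does not mutate it).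

-- ===== PORT A =====
-- new_qux: ['R','G','B'].remove(a); .remove(b); return rest[0] — none exactly where Python's
-- list.remove raises ValueError (a or b not present).
def newQuxA (a b : String) : Option String :=
  (PySem.List.remove? ["R", "G", "B"] a).bind fun l1 =>
  (PySem.List.remove? l1 b).bind fun l2 =>
  PySem.List.pyGet? l2 0

-- inner 'while transformed and transformed[-1] != top_qux' loop; the stack `transformed` is kept
-- REVERSED (top at head) so pop/peek at the Python list's end is structural recursion at the head.
def innerA (transformed : List String) (top : String) : Option (List String × String) :=
  match transformed with
  | [] => some ([], top)
  | last :: rest =>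
      if last ≠ top then
        (newQuxA top last).bind fun t => innerA rest t
      else
        some (last :: rest, top)

-- outer 'while quxes: top = quxes.pop(0); …; transformed.append(top)' loop
def outerA (quxes : List String) (transformed : List String) : Option (List String) :=
  match quxes with
  | [] => some transformed
  | q :: rest =>
      (innerA transformed q).bind fun st => outerA rest (st.2 :: st.1)

def quxes_tranformation (quxes : List String) : Int :=
  if quxes.length == 0 then 0
  else if quxes.length == 1 then 1
  else
    match outerA quxes [] with
    | some transformed => (transformed.length : Int)
    | none => 0  -- unreachable under Pre_ (Python raises ValueError here)

-- ===== PORT B =====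
def newQuxB (a b : String) : Option String :=
  (PySem.List.remove? ["R", "G", "B"] a).bind fun l1 =>
  (PySem.List.remove? l1 b).bind fun l2 =>
  PySem.List.pyGet? l2 0

-- one step of B's pass; run state (cur, cnt), cur = "" stands for the initial None (never read while cnt = 0)
def stepB (acc : Option (String × Int)) (q : String) : Option (String × Int) :=
  acc.bind fun st =>
    if st.2 == 0 then some (q, 1)
    else if q == st.1 then some (st.1, st.2 + 1)
    else (newQuxB q st.1).map fun t => (if PySem.Int.mod st.2 2 == 0 then q else t, 1)

def quxes_tranformation_alt (quxes : List String) : Int :=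
  match quxes.foldl stepB (some ("", 0)) with
  | some st => st.2
  | none => 0  -- unreachable under Pre_ (Python raises ValueError here)

-- ===== PRECONDITION & SPEC =====
-- Pre_ excludes exactly the inputs on which Python A raises ValueError (inside new_qux): lists that
-- are neither constant nor drawn entirely from {'R','G','B'}. B raises ValueError on the same inputs.
def Pre_quxes_tranformation (quxes : List String) : Prop :=
  (∀ x ∈ quxes, quxes.head? = some x) ∨ (∀ x ∈ quxes, x ∈ (["R", "G", "B"] : List String))
instance (quxes : List String) : Decidable (Pre_quxes_tranformation quxes) := by
  unfold Pre_quxes_tranformation; infer_instance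

def pvWitness_quxes_tranformation : List String := ["R", "G", "B", "B", "R"]

def Spec_quxes_tranformation (quxes : List String) (out : Int) : Prop := out = quxes_tranformation_alt quxes
instance (quxes : List String) (out : Int) : Decidable (Spec_quxes_tranformation quxes out) := by unfold Spec_quxes_tranformation; infer_instance

-- ===== CLAIM (what is proved, stated in full; the proofs are below) =====
def Claim_equal_quxes_tranformation : Prop := ∀ (quxes : List String), Dom_quxes_tranformation quxes → Pre_quxes_tranformation quxes → Spec_quxes_tranformation quxes (quxes_tranformation quxes)

-- ===== LEMMAS AND PROOFS =====

def RGB : List String := ["R", "G", "B"]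

-- the third color, distinct from two distinct RGB colors
def third (a b : String) : String :=
  if a ≠ "R" ∧ b ≠ "R" then "R" else if a ≠ "G" ∧ b ≠ "G" then "G" else "B"

lemma newQuxA_eq_third {a b : String} (ha : a ∈ RGB) (hb : b ∈ RGB) (hne : a ≠ b) :
    newQuxA a b = some (third a b) := by
  fin_cases ha <;> fin_cases hb <;> simp_all <;> rfl

lemma third_mem {a b : String} (ha : a ∈ RGB) (hb : b ∈ RGB) :
    third a b ∈ RGB := by fin_cases ha <;> fin_cases hb <;> decide

lemma third_ne_left {a b : String} (ha : a ∈ RGB) (hb : b ∈ RGB) (hne : a ≠ b) :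
    third a b ≠ a := by fin_cases ha <;> fin_cases hb <;> simp_all <;> decide

lemma third_comm (a b : String) : third a b = third b a := by
  unfold third; split_ifs with h1 h2 h3 h4 h5 <;> tauto

lemma third_third {a b : String} (ha : a ∈ RGB) (hb : b ∈ RGB) (hne : a ≠ b) :
    third a (third a b) = b := by fin_cases ha <;> fin_cases hb <;> simp_all <;> decide

-- A's inner loop on a monochromatic stack of a different RGB color: it empties the stack and the
-- surviving color is decided by the parity of the stack height.
lemma innerA_replicate {a : String} (ha : a ∈ RGB) :
    ∀ (k : ℕ) {b : String}, b ∈ RGB → a ≠ b →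
      innerA (List.replicate k a) b = some ([], if k % 2 = 0 then b else third a b) := by
  intro k
  induction k with
  | zero => intro b _ _; simp [innerA]
  | succ k ih =>
      intro b hb hne
      have hstep : newQuxA b a = some (third a b) := by
        rw [newQuxA_eq_third hb ha (Ne.symm hne)]; rw [third_comm]
      have ht : third a b ∈ RGB := third_mem ha hb
      have hta : a ≠ third a b := (Ne.symm (third_ne_left ha hb hne))
      rw [List.replicate_succ]
      simp only [innerA, if_pos hne, hstep, Option.bind_some]
      rw [ih ht hta]
      rcases Nat.even_or_odd k with hk | hk
      · have h1 : k % 2 = 0 := Nat.even_iff.mp hk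
        have h2 : (k + 1) % 2 = 1 := by omega
        simp [h1, h2]
      · have h1 : k % 2 = 1 := Nat.odd_iff.mp hk
        have h2 : (k + 1) % 2 = 0 := by omega
        simp [h1, h2, third_third ha hb hne]

-- outer loop vs B's fold, from matching states: A's stack is replicate k c exactly when B's run
-- state is (c, k), provided the remaining input is all-equal-to-c or everything involved is RGB.
lemma outer_eq_fold :
    ∀ (qs : List String) (c : String) (k : ℕ), 1 ≤ k →
    ((∀ q ∈ qs, q = c) ∨ (c ∈ RGB ∧ ∀ q ∈ qs, q ∈ RGB)) →
    ∃ c' k', 1 ≤ k' ∧ outerA qs (List.replicate k c) = some (List.replicate k' c') ∧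
      qs.foldl stepB (some (c, (k : ℤ))) = some (c', (k' : ℤ)) := by
  intro qs
  induction qs with
  | nil => intro c k hk _; exact ⟨c, k, hk, rfl, rfl⟩
  | cons q rest ih =>
      intro c k hk hcond
      have hk0 : ((k : ℤ) == 0) = false := by rw [beq_eq_false_iff_ne]; omega
      by_cases hqc : q = c
      · -- same color: A pushes, B increments
        subst hqc
        obtain ⟨m, rfl⟩ : ∃ m, k = m + 1 := ⟨k - 1, by omega⟩
        have hinner : innerA (List.replicate (m + 1) q) q = some (List.replicate (m + 1) q, q) := by
          simp [List.replicate_succ, innerA]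
        have hcond' : (∀ x ∈ rest, x = q) ∨ (q ∈ RGB ∧ ∀ x ∈ rest, x ∈ RGB) := by
          rcases hcond with h | ⟨hc, h⟩
          · exact Or.inl fun x hx => h x (List.mem_cons_of_mem _ hx)
          · exact Or.inr ⟨hc, fun x hx => h x (List.mem_cons_of_mem _ hx)⟩
        obtain ⟨c', k', hk', hA, hB⟩ := ih q (m + 1 + 1) (by omega) hcond'
        refine ⟨c', k', hk', ?_, ?_⟩
        · simp only [outerA, hinner, Option.bind_some]
          rw [show (q :: List.replicate (m + 1) q) = List.replicate (m + 1 + 1) q from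
            (List.replicate_succ ..).symm]
          exact hA
        · simp only [List.foldl_cons, stepB, Option.bind_some, hk0, Bool.false_eq_true,
            if_false, beq_self_eq_true, if_true]
          push_cast at hB
          exact hB
      · -- different color: both inputs are RGB (the constant disjunct is impossible)
        have hc : c ∈ RGB ∧ q ∈ RGB ∧ ∀ x ∈ rest, x ∈ RGB := by
          rcases hcond with h | ⟨hcR, h⟩
          · exact absurd (h q (List.mem_cons_self)) hqc
          · exact ⟨hcR, h q (List.mem_cons_self), fun x hx => h x (List.mem_cons_of_mem _ hx)⟩
        obtain ⟨hcR, hqR, hrest⟩ := hc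
        have hinner := innerA_replicate hcR k hqR (fun h => hqc h.symm)
        set c₂ : String := if k % 2 = 0 then q else third c q with hc2
        have hc2R : c₂ ∈ RGB := by
          rw [hc2]; split
          · exact hqR
          · exact third_mem hcR hqR
        have hcond' : (∀ x ∈ rest, x = c₂) ∨ (c₂ ∈ RGB ∧ ∀ x ∈ rest, x ∈ RGB) :=
          Or.inr ⟨hc2R, hrest⟩
        obtain ⟨c', k', hk', hA, hB⟩ := ih c₂ 1 le_rfl hcond'
        have hnq : newQuxB q c = some (third c q) := by
          show newQuxA q c = _
          rw [newQuxA_eq_third hqR hcR (fun h => hqc h), third_comm]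
        have hmod : (PySem.Int.mod (k : ℤ) 2 == 0) = decide (k % 2 = 0) := by
          rw [PySem.Int.mod_eq_emod_of_pos (by norm_num)]
          rcases Nat.even_or_odd k with hk2 | hk2
          · have := Nat.even_iff.mp hk2; simp [this]; omega
          · have := Nat.odd_iff.mp hk2; simp [this]; omega
        refine ⟨c', k', hk', ?_, ?_⟩
        · simp only [outerA, hinner, Option.bind_some]
          exact hA
        · simp only [List.foldl_cons, stepB, Option.bind_some, hk0, Bool.false_eq_true, if_false]
          rw [if_neg (by simp [hqc]), hnq]
          simp only [Option.map_some, hmod]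
          have : (if decide (k % 2 = 0) = true then q else third c q) = c₂ := by
            rw [hc2]; split_ifs with h1 h2 h3 <;> simp_all
          rw [this]
          exact_mod_cast hB

-- ===== VERDICT (by name: the statement is the Claim_ definition above) =====
theorem quxes_tranformation_spec : Claim_equal_quxes_tranformation := by
  intro quxes _ hpre
  unfold Spec_quxes_tranformation
  match quxes with
  | [] => rfl
  | [q] => rfl
  | q :: r :: rest =>
      have hcond : (∀ x ∈ r :: rest, x = q) ∨ (q ∈ RGB ∧ ∀ x ∈ r :: rest, x ∈ RGB) := by
        rcases hpre with h | h
        · left; intro x hx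
          have := h x (List.mem_cons_of_mem _ hx)
          simpa using this.symm
        · right
          exact ⟨h q List.mem_cons_self, fun x hx => h x (List.mem_cons_of_mem _ hx)⟩
      obtain ⟨c', k', hk', hA, hB⟩ := outer_eq_fold (r :: rest) q 1 le_rfl hcond
      unfold quxes_tranformation quxes_tranformation_alt
      have hlen : ((q :: r :: rest).length == 0) = false := by simp
      have hlen1 : ((q :: r :: rest).length == 1) = false := by simp
      rw [hlen, hlen1]
      simp only [Bool.false_eq_true, if_false]
      have houter : outerA (q :: r :: rest) [] = some (List.replicate k' c') := by
        simp only [outerA, innerA, Option.bind_some]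
        exact hA
      have hfold : (q :: r :: rest).foldl stepB (some ("", 0)) = some (c', (k' : ℤ)) := by
        have h1 : stepB (some ("", 0)) q = some (q, 1) := by simp [stepB]
        rw [List.foldl_cons, h1]
        simpa using hB
      rw [houter, hfold]
      simp
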